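-- pv_equiv track=rewrite | github.com/aloshabest/study | test3.py | find_longest_lenght
-- ===== SOURCE A (Python) =====
-- def find_longest_lenght(strs):
--     lst = []
--     count = 0
--     for i in range(1, len(strs)):
--         if strs[i] != strs[i-1]:
--             count += 1
--         elif strs[i] == strs[i-1]:
--             lst.append(count)
--             count = 0
--     lst.append(count)
--     return max(lst)
-- ===== SOURCE B (Python) =====
-- def find_longest_lenght(strs):
--     # Build the adjacency-difference table as a '1'/'0' string, then the
--     # answer is the longest run of '1's: split on '0' and take the max length.
--     bits = ''.join('1' if strs[i] != strs[i - 1] else '0' for i in range(1, len(strs)))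
--     return max(len(run) for run in bits.split('0'))
-- ===== Notes on version B (the rewrite author's own statement) =====
-- stated objective: alternative
-- what changed: A's single accumulate-append-reset pass over indices is replaced by a two-phase decomposition: build the adjacency-difference table as a bit string, then split it at the zero marks and take the maximum piece length.
import Mathlib
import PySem

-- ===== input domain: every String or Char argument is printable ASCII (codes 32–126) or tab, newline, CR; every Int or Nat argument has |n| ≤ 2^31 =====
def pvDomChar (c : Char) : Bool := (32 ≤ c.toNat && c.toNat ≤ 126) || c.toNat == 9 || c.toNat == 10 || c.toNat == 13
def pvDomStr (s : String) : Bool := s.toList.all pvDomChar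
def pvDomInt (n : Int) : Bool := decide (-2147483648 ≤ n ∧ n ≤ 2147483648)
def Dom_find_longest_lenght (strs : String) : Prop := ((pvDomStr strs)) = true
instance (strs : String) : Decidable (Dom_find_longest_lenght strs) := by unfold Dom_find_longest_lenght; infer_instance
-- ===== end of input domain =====

-- B replaces A's accumulate-append-reset pass by a two-phase decomposition:
-- build the adjacency-difference bit string, then split it at the zero marks and take the max piece length.


-- ===== PORT A =====
def find_longest_lenght (strs : String) : Int :=
  let cs := strs.toList
  let st := (PySem.List.pyRange 1 (PySem.Str.len strs) 1).foldl
    (fun (acc : List Int × Int) i =>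
      if PySem.List.pyGetD cs i ' ' ≠ PySem.List.pyGetD cs (i - 1) ' ' then
        (acc.1, acc.2 + 1)
      else
        (acc.1 ++ [acc.2], 0))
    ([], 0)
  ((PySem.List.max? (st.1 ++ [st.2]) (fun x => x)).getD 0)

-- ===== PORT B =====
def find_longest_lenght_alt (strs : String) : Int :=
  let cs := strs.toList
  let bits := (PySem.List.pyRange 1 (PySem.Str.len strs) 1).map
    (fun i => if PySem.List.pyGetD cs i ' ' ≠ PySem.List.pyGetD cs (i - 1) ' ' then '1' else '0')
  let runs := PySem.Chars.splitOn bits ['0']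
  ((PySem.List.max? (runs.map (fun r => (r.length : Int))) (fun x => x)).getD 0)

-- ===== PRECONDITION & SPEC =====
def Spec_find_longest_lenght (strs : String) (out : Int) : Prop := out = find_longest_lenght_alt strs
instance (strs : String) (out : Int) : Decidable (Spec_find_longest_lenght strs out) := by unfold Spec_find_longest_lenght; infer_instance

-- ===== CLAIM (what is proved, stated in full; the proofs are below) =====
def Claim_equal_find_longest_lenght : Prop := ∀ (strs : String), Dom_find_longest_lenght strs → Spec_find_longest_lenght strs (find_longest_lenght strs)

-- ===== LEMMAS AND PROOFS =====

-- A's loop body, over the boolean "adjacent chars differ" table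
def pvStep (acc : List Int × Int) (b : Bool) : List Int × Int :=
  if b then (acc.1, acc.2 + 1) else (acc.1 ++ [acc.2], 0)

-- run-length table of a boolean list: lengths of maximal true-runs, with boundary zeros
def pvPieces : List Bool → List Int
  | [] => [0]
  | true :: ds => match pvPieces ds with
      | [] => [1]
      | p :: ps => (p + 1) :: ps
  | false :: ds => 0 :: pvPieces ds

-- structural split of a char list on '0'
def pvSplit : List Char → List (List Char)
  | [] => [[]]
  | c :: rest => if c = '0' then [] :: pvSplit rest
      else match pvSplit rest with
        | [] => [[c]]
        | p :: ps => (c :: p) :: ps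

def pvIncHead (c : Int) : List Int → List Int
  | [] => [c]
  | p :: ps => (c + p) :: ps

def pvBit (b : Bool) : Char := if b then '1' else '0'

theorem pvStep_true (acc : List Int × Int) : pvStep acc true = (acc.1, acc.2 + 1) := rfl
theorem pvStep_false (acc : List Int × Int) : pvStep acc false = (acc.1 ++ [acc.2], 0) := rfl
theorem pvBit_true : pvBit true = '1' := rfl
theorem pvBit_false : pvBit false = '0' := rfl

theorem pvPieces_ne_nil (ds : List Bool) : pvPieces ds ≠ [] := by
  match ds with
  | [] => simp [pvPieces]
  | true :: ds =>
      cases h : pvPieces ds <;> simp [pvPieces, h]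
  | false :: ds => simp [pvPieces]

theorem pvSplit_ne_nil (l : List Char) : pvSplit l ≠ [] := by
  match l with
  | [] => simp [pvSplit]
  | c :: rest =>
      by_cases h : c = '0'
      · simp [pvSplit, h]
      · cases h2 : pvSplit rest <;> simp [pvSplit, h, h2]

theorem pvIncHead_zero (xs : List Int) (h : xs ≠ []) : pvIncHead 0 xs = xs := by
  cases xs with
  | nil => exact absurd rfl h
  | cons p ps => simp [pvIncHead]

-- A's fold, characterised by pvPieces
theorem foldA_eq (ds : List Bool) : ∀ (lst : List Int) (count : Int),
    (ds.foldl pvStep (lst, count)).1 ++ [(ds.foldl pvStep (lst, count)).2]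
      = lst ++ pvIncHead count (pvPieces ds) := by
  induction ds with
  | nil => intro lst count; simp [pvPieces, pvIncHead]
  | cons d ds ih =>
      intro lst count
      obtain ⟨p, ps, hp⟩ : ∃ p ps, pvPieces ds = p :: ps := by
        cases h : pvPieces ds with
        | nil => exact absurd h (pvPieces_ne_nil ds)
        | cons p ps => exact ⟨p, ps, rfl⟩
      cases d with
      | true =>
          rw [List.foldl_cons, pvStep_true, ih lst (count + 1), pvPieces, hp]
          simp only [pvIncHead]
          ring_nf
      | false =>
          rw [List.foldl_cons, pvStep_false, ih (lst ++ [count]) 0, pvPieces]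
          simp [pvIncHead, hp]

-- B's split of the bit table, characterised by pvPieces
theorem split_map_eq (ds : List Bool) :
    (pvSplit (ds.map pvBit)).map (fun r => (r.length : Int)) = pvPieces ds := by
  induction ds with
  | nil => simp [pvSplit, pvPieces]
  | cons d ds ih =>
      cases d with
      | true =>
          obtain ⟨p, ps, hp⟩ : ∃ p ps, pvSplit (ds.map pvBit) = p :: ps := by
            cases h : pvSplit (ds.map pvBit) with
            | nil => exact absurd h (pvSplit_ne_nil _)
            | cons p ps => exact ⟨p, ps, rfl⟩
          rw [hp] at ih
          rw [List.map_cons, pvBit_true, pvSplit, if_neg (by decide), hp, pvPieces, ← ih,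
            List.map_cons, List.map_cons]
          simp only [List.length_cons, Nat.cast_add, Nat.cast_one]
      | false =>
          rw [List.map_cons, pvBit_false, pvSplit, if_pos rfl, pvPieces, ← ih]
          simp

-- the fuelled splitOn.go on a single-char separator computes pvSplit
theorem go_eq (l : List Char) : ∀ (fuel : Nat) (cur : List Char) (acc : List (List Char)),
    l.length < fuel →
    PySem.Chars.splitOn.go ['0'] fuel l cur acc
      = acc.reverse ++ (match pvSplit l with
          | [] => [cur.reverse]
          | p :: ps => (cur.reverse ++ p) :: ps) := by
  induction l with
  | nil =>
      intro fuel cur acc h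
      match fuel with
      | fuel + 1 => simp [PySem.Chars.splitOn.go, pvSplit]
  | cons c rest ih =>
      intro fuel cur acc h
      match fuel with
      | fuel + 1 =>
        obtain ⟨p, ps, hp⟩ : ∃ p ps, pvSplit rest = p :: ps := by
          cases h2 : pvSplit rest with
          | nil => exact absurd h2 (pvSplit_ne_nil _)
          | cons p ps => exact ⟨p, ps, rfl⟩
        by_cases hc : c = '0'
        · subst hc
          rw [PySem.Chars.splitOn.go, if_pos (by simp [List.isPrefixOf])]
          rw [show List.drop ['0'].length ('0' :: rest) = rest from rfl]
          rw [ih fuel [] (cur.reverse :: acc) (by simpa using h)]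
          rw [pvSplit, if_pos rfl, hp]
          simp
        · rw [PySem.Chars.splitOn.go, if_neg (by simp [List.isPrefixOf, Ne.symm hc])]
          rw [ih fuel (c :: cur) acc (by simpa using h)]
          rw [pvSplit, if_neg hc, hp]
          simp

theorem splitOn_eq (l : List Char) : PySem.Chars.splitOn l ['0'] = pvSplit l := by
  rw [PySem.Chars.splitOn, go_eq l (l.length + 1) [] [] (by omega)]
  obtain ⟨p, ps, hp⟩ : ∃ p ps, pvSplit l = p :: ps := by
    cases h : pvSplit l with
    | nil => exact absurd h (pvSplit_ne_nil _)
    | cons p ps => exact ⟨p, ps, rfl⟩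
  rw [hp]; simp

-- ===== VERDICT (by name: the statement is the Claim_ definition above) =====
theorem find_longest_lenght_spec : Claim_equal_find_longest_lenght := by
  intro strs _
  unfold Spec_find_longest_lenght find_longest_lenght find_longest_lenght_alt
  set cs := strs.toList with hcs
  set rng := PySem.List.pyRange 1 (PySem.Str.len strs) 1 with hrng
  set cond : Int → Bool := fun i =>
    decide (PySem.List.pyGetD cs i ' ' ≠ PySem.List.pyGetD cs (i - 1) ' ') with hcond
  have hA : (fun (acc : List Int × Int) i =>
        if PySem.List.pyGetD cs i ' ' ≠ PySem.List.pyGetD cs (i - 1) ' ' then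
          (acc.1, acc.2 + 1)
        else (acc.1 ++ [acc.2], 0))
      = (fun (acc : List Int × Int) i => pvStep acc (cond i)) := by
    funext acc i
    by_cases h : PySem.List.pyGetD cs i ' ' ≠ PySem.List.pyGetD cs (i - 1) ' ' <;>
      simp [hcond, pvStep, h]
  have hB : (fun i =>
        if PySem.List.pyGetD cs i ' ' ≠ PySem.List.pyGetD cs (i - 1) ' ' then '1' else '0')
      = (fun i => pvBit (cond i)) := by
    funext i
    by_cases h : PySem.List.pyGetD cs i ' ' ≠ PySem.List.pyGetD cs (i - 1) ' ' <;>
      simp [hcond, pvBit, h]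
  simp only [hA, hB]
  rw [show (rng.map (fun i => pvBit (cond i))) = (rng.map cond).map pvBit by
        rw [List.map_map]; rfl,
      show rng.foldl (fun (acc : List Int × Int) i => pvStep acc (cond i)) ([], 0)
          = (rng.map cond).foldl pvStep ([], 0) by rw [List.foldl_map]]
  rw [splitOn_eq, split_map_eq, foldA_eq, pvIncHead_zero _ (pvPieces_ne_nil _)]
  simp
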